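-- pv_equiv track=rewrite | github.com/amromero92/sm_ub | ucc_lipkin.py | JmJm
-- ===== SOURCE A (Python) =====
-- import copy
--
-- def JmJm(mb_state):
--  flipped_spin_states = []
--  for s in range(len(mb_state)):
--   for r in range(s+1,len(mb_state)):
--    new_state = copy.deepcopy(list(mb_state))  #Important to use this, otherwise mb_state is modified
--    sp_s, sp_r = mb_state[s], mb_state[r]
--    if (sp_s[1] == 1 and sp_r[1] == 1):        #Spins up
--     new_state[s][1], new_state[r][1] = -1, -1 #Flip to spin down
--     flipped_spin_states.append(tuple(new_state))
--
--  return flipped_spin_states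
-- ===== SOURCE B (Python) =====
-- def JmJm(mb_state):
--     # Collect indices of spin-up sites once, then pair them directly (while/pop decomposition).
--     ups = [i for i, row in enumerate(mb_state) if len(row) > 1 and row[1] == 1]
--
--     def flip(a, b):
--         return tuple(row[:1] + [-1] + row[2:] if i == a or i == b else row[:]
--                      for i, row in enumerate(mb_state))
--
--     out = []
--     while ups:
--         a = ups.pop(0)
--         out.extend(flip(a, b) for b in ups)
--     return out
-- ===== Notes on version B (the rewrite author's own statement) =====
-- stated objective: alternative
-- what changed: A scans all O(n^2) index pairs, deep-copying the whole state and testing both spins for each pair; B first collects the spin-up indices in one pass and then pairs only those, building each flipped state directly.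
import Mathlib
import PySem

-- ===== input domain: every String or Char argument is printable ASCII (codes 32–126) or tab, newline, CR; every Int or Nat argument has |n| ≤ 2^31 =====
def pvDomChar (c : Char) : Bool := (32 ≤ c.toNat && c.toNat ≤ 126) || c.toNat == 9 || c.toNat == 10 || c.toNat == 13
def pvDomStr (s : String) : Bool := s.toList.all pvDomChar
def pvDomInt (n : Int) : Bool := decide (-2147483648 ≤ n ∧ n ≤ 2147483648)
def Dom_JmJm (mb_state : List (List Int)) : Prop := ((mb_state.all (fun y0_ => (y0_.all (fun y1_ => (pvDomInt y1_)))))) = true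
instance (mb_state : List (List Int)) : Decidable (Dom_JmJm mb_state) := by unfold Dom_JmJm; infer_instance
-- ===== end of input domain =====

-- B replaces A's quadratic scan over all index pairs by one pass collecting the spin-up
-- indices, then pairs only those (same return value; equality proved on the return value).

-- ===== PORT A =====
-- new_state[s][1], new_state[r][1] = -1, -1  (deepcopy = value copy; in-range under Pre_)
def pvFlipA (mb : List (List Int)) (s r : Int) : List (List Int) :=
  (mb.modify s.toNat (fun row => row.set 1 (-1))).modify r.toNat (fun row => row.set 1 (-1))

def JmJm (mb_state : List (List Int)) : List (List (List Int)) :=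
  (PySem.List.pyRange 0 (mb_state.length : Int) 1).foldl (fun acc s =>
    (PySem.List.pyRange (s + 1) (mb_state.length : Int) 1).foldl (fun acc2 r =>
      -- sp_s, sp_r = mb_state[s], mb_state[r]  (in range under Pre_)
      let sp_s := PySem.List.pyGetD mb_state s []
      let sp_r := PySem.List.pyGetD mb_state r []
      if PySem.List.pyGetD sp_s 1 0 = 1 ∧ PySem.List.pyGetD sp_r 1 0 = 1 then
        acc2 ++ [pvFlipA mb_state s r]
      else acc2) acc) []

-- ===== PORT B =====
-- tuple(row[:1] + [-1] + row[2:] if i == a or i == b else row[:] for i, row in enumerate(mb_state))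
-- (row[:1] / row[2:] are nonnegative slices: exactly List.take 1 / List.drop 2)
def pvFlipB (mb : List (List Int)) (a b : Int) : List (List Int) :=
  (PySem.List.enumerate mb 0).map (fun p =>
    if p.1 = a ∨ p.1 = b then p.2.take 1 ++ [-1] ++ p.2.drop 2 else p.2)

-- while ups: a = ups.pop(0); out.extend(flip(a, b) for b in ups)
def pvLoopB {α : Type} (g : Int → Int → α) : List Int → List α
  | [] => []
  | a :: rest => rest.map (g a) ++ pvLoopB g rest

def JmJm_alt (mb_state : List (List Int)) : List (List (List Int)) :=
  let ups := ((PySem.List.enumerate mb_state 0).filter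
      (fun p => decide (1 < p.2.length) && decide (PySem.List.pyGetD p.2 1 0 = 1))).map Prod.fst
  pvLoopB (pvFlipB mb_state) ups

-- ===== PRECONDITION & SPEC =====
-- Pre_ is exactly where Python A returns: every row read by A has length ≥ 2 (A raises
-- IndexError on sp[1] otherwise); the last row is only read when some earlier row is spin-up.
def Pre_JmJm (mb_state : List (List Int)) : Prop :=
  (∀ i < mb_state.length - 1, 2 ≤ (mb_state.getD i []).length) ∧
  ((∃ i < mb_state.length - 1, PySem.List.pyGetD (mb_state.getD i []) 1 0 = 1) →
    2 ≤ (mb_state.getD (mb_state.length - 1) []).length)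
instance (mb_state : List (List Int)) : Decidable (Pre_JmJm mb_state) := by
  unfold Pre_JmJm; infer_instance

def pvWitness_JmJm : List (List Int) := [[0, 1], [0, 1], [0, -1]]

def Spec_JmJm (mb_state : List (List Int)) (out : List (List (List Int))) : Prop := out = JmJm_alt mb_state
instance (mb_state : List (List Int)) (out : List (List (List Int))) : Decidable (Spec_JmJm mb_state out) := by unfold Spec_JmJm; infer_instance

-- ===== CLAIM (what is proved, stated in full; the proofs are below) =====
def Claim_equal_JmJm : Prop := ∀ (mb_state : List (List Int)), Dom_JmJm mb_state → Pre_JmJm mb_state → Spec_JmJm mb_state (JmJm mb_state)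

-- ===== LEMMAS AND PROOFS =====

-- the spin-up test of A (via pyGetD, default 0) and of B (length guard + entry test) agree
theorem pvRow_test (row : List Int) :
    (decide (1 < row.length) && decide (PySem.List.pyGetD row 1 0 = 1)) =
      decide (PySem.List.pyGetD row 1 0 = 1) := by
  match row with
  | [] => simp [PySem.List.pyGetD, PySem.List.pyGet?, PySem.List.pyIdx?]
  | [x] => simp [PySem.List.pyGetD, PySem.List.pyGet?, PySem.List.pyIdx?]
  | x :: y :: rest => simp

-- A's condition on index s, as a predicate
abbrev pvP (mb : List (List Int)) (s : Int) : Prop :=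
  PySem.List.pyGetD (PySem.List.pyGetD mb s []) 1 0 = 1

-- inner loop of A: append g r for each r in l with pvP mb a ∧ pvP mb r
theorem pvInner_eq (mb : List (List Int)) (a : Int) (g : Int → List (List Int))
    (l : List Int) (acc : List (List (List Int))) :
    l.foldl (fun acc2 r => if pvP mb a ∧ pvP mb r then acc2 ++ [g r] else acc2) acc =
      acc ++ (if pvP mb a then (l.filter (fun r => decide (pvP mb r))).map g else []) := by
  induction l generalizing acc with
  | nil => simp
  | cons x xs ih =>
    by_cases ha : pvP mb a
    · by_cases hx : pvP mb x
      · rw [List.foldl_cons, if_pos ⟨ha, hx⟩, ih, if_pos ha, if_pos ha,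
          List.filter_cons, if_pos (by simpa using hx), List.map_cons]
        simp
      · rw [List.foldl_cons, if_neg (fun h => hx h.2), ih, if_pos ha, if_pos ha,
          List.filter_cons, if_neg (by simpa using hx)]
    · rw [List.foldl_cons, if_neg (fun h => ha h.1), ih, if_neg ha, if_neg ha]

-- the whole double loop of A equals pvLoopB over the filtered index range
theorem pvOuter_eq (mb : List (List Int)) (g : Int → Int → List (List Int)) :
    ∀ (fuel : Nat) (a : Int), ((mb.length : Int) - a).toNat ≤ fuel →
    ∀ (acc : List (List (List Int))),
    (PySem.List.pyRange a (mb.length : Int) 1).foldl (fun acc s =>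
      (PySem.List.pyRange (s + 1) (mb.length : Int) 1).foldl (fun acc2 r =>
        if pvP mb s ∧ pvP mb r then acc2 ++ [g s r] else acc2) acc) acc =
      acc ++ pvLoopB g ((PySem.List.pyRange a (mb.length : Int) 1).filter
        (fun x => decide (pvP mb x))) := by
  intro fuel
  induction fuel with
  | zero =>
    intro a hfa acc
    have hle : (mb.length : Int) ≤ a := by omega
    rw [PySem.List.pyRange_one_eq_nil hle]
    simp [pvLoopB]
  | succ n ih =>
    intro a hfa acc
    by_cases hlt : a < (mb.length : Int)
    · rw [PySem.List.pyRange_one_cons hlt]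
      simp only [List.foldl_cons, List.filter_cons]
      rw [pvInner_eq]
      rw [ih (a + 1) (by omega)]
      by_cases ha : pvP mb a
      · rw [if_pos ha, if_pos (by simpa using ha)]
        simp [pvLoopB, List.append_assoc]
      · rw [if_neg ha, if_neg (by simpa using ha)]
        simp
    · have hle : (mb.length : Int) ≤ a := by omega
      rw [PySem.List.pyRange_one_eq_nil hle]
      simp [pvLoopB]

-- B's ups list equals the filtered index range
theorem pvUps_eq (mb : List (List Int)) :
    ((PySem.List.enumerate mb 0).filter
        (fun p => decide (1 < p.2.length) && decide (PySem.List.pyGetD p.2 1 0 = 1))).map Prod.fst =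
      (PySem.List.pyRange 0 (mb.length : Int) 1).filter (fun x => decide (pvP mb x)) := by
  rw [PySem.List.enumerate_eq_map_pyRange (d := [])]
  rw [List.filter_map]
  have hcong : List.filter
      ((fun p : Int × List Int => decide (1 < p.2.length) && decide (PySem.List.pyGetD p.2 1 0 = 1)) ∘
        (fun j => (j, PySem.List.pyGetD mb j [])))
      (PySem.List.pyRange 0 (PySem.List.len mb) 1) =
      List.filter (fun x => decide (pvP mb x)) (PySem.List.pyRange 0 (PySem.List.len mb) 1) :=
    List.filter_congr (fun x _ => pvRow_test (PySem.List.pyGetD mb x []))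
  rw [hcong, List.map_map]
  simp only [PySem.List.len] at *
  exact (List.map_congr_left (fun x _ => rfl)).trans (List.map_id _)

-- from pvP: the row really has length ≥ 2
theorem pvP_row_len {row : List Int} (h : PySem.List.pyGetD row 1 0 = 1) : 2 ≤ row.length := by
  match row with
  | [] => simp [PySem.List.pyGetD, PySem.List.pyGet?, PySem.List.pyIdx?] at h
  | [x] => simp [PySem.List.pyGetD, PySem.List.pyGet?, PySem.List.pyIdx?] at h
  | x :: y :: rest => simp

-- set index 1 to -1 = take 1 ++ [-1] ++ drop 2, for rows of length ≥ 2
theorem pvSet_eq {row : List Int} (h : 2 ≤ row.length) :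
    row.set 1 (-1) = row.take 1 ++ [-1] ++ row.drop 2 := by
  match row with
  | [] => simp at h
  | [x] => simp at h
  | x :: y :: rest => simp

-- the two flips agree on in-range spin-up indices
theorem pvFlip_eq (mb : List (List Int)) (a b : Int)
    (ha0 : 0 ≤ a) (han : a < (mb.length : Int)) (hb0 : 0 ≤ b) (hbn : b < (mb.length : Int))
    (hpa : pvP mb a) (hpb : pvP mb b) :
    pvFlipA mb a b = pvFlipB mb a b := by
  have hanat : a.toNat < mb.length := by omega
  have hbnat : b.toNat < mb.length := by omega
  have hga : PySem.List.pyGetD mb a [] = mb[a.toNat] :=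
    PySem.List.pyGetD_eq_getElem mb [] ha0 han
  have hgb : PySem.List.pyGetD mb b [] = mb[b.toNat] :=
    PySem.List.pyGetD_eq_getElem mb [] hb0 hbn
  have hla : 2 ≤ mb[a.toNat].length := pvP_row_len (by rw [← hga]; exact hpa)
  have hlb : 2 ≤ mb[b.toNat].length := pvP_row_len (by rw [← hgb]; exact hpb)
  apply List.ext_getElem
  · simp [pvFlipA, pvFlipB, PySem.List.length_enumerate]
  · intro i hi1 hi2
    have hin : i < mb.length := by simpa [pvFlipA] using hi1
    have hBi : (pvFlipB mb a b)[i] =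
        (if ((0 : Int) + i = a ∨ (0 : Int) + i = b) then
          mb[i].take 1 ++ [-1] ++ mb[i].drop 2 else mb[i]) := by
      simp [pvFlipB, PySem.List.getElem_enumerate]
    have hAi : (pvFlipA mb a b)[i] =
        (if b.toNat = i then (if a.toNat = i then (mb[i].set 1 (-1)) else mb[i]).set 1 (-1)
         else (if a.toNat = i then mb[i].set 1 (-1) else mb[i])) := by
      simp [pvFlipA, List.getElem_modify]
    rw [hAi, hBi]
    by_cases hib : b.toNat = i <;> by_cases hia : a.toNat = i
    · subst hib
      rw [if_pos rfl, if_pos hia, if_pos (Or.inr (by omega)), List.set_set]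
      exact pvSet_eq hlb
    · subst hib
      rw [if_pos rfl, if_neg hia, if_pos (Or.inr (by omega))]
      exact pvSet_eq hlb
    · subst hia
      rw [if_neg hib, if_pos rfl, if_pos (Or.inl (by omega))]
      exact pvSet_eq hla
    · rw [if_neg hib, if_neg hia, if_neg (by push Not; constructor <;> omega)]

-- pvLoopB only looks at g on members of the list
theorem pvLoopB_congr {α : Type} (g1 g2 : Int → Int → α) (C : Int → Prop)
    (hg : ∀ a b, C a → C b → g1 a b = g2 a b) :
    ∀ l : List Int, (∀ x ∈ l, C x) → pvLoopB g1 l = pvLoopB g2 l := by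
  intro l
  induction l with
  | nil => intro _; rfl
  | cons a rest ih =>
    intro hl
    simp only [pvLoopB]
    rw [ih (fun x hx => hl x (List.mem_cons_of_mem a hx))]
    congr 1
    exact List.map_congr_left (fun b hb =>
      hg a b (hl a (List.mem_cons_self)) (hl b (List.mem_cons_of_mem a hb)))

-- the unconditional equality of the two ports
theorem pvMain (mb : List (List Int)) : JmJm mb = JmJm_alt mb := by
  unfold JmJm JmJm_alt
  rw [pvOuter_eq mb (pvFlipA mb) ((mb.length : Int) - 0).toNat 0 (le_refl _) []]
  rw [pvUps_eq]
  simp only [List.nil_append]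
  apply pvLoopB_congr (pvFlipA mb) (pvFlipB mb)
    (fun x => 0 ≤ x ∧ x < (mb.length : Int) ∧ pvP mb x)
  · rintro a b ⟨ha0, han, hpa⟩ ⟨hb0, hbn, hpb⟩
    exact pvFlip_eq mb a b ha0 han hb0 hbn hpa hpb
  · intro x hx
    have hm := List.mem_filter.mp hx
    have hr := (PySem.List.mem_pyRange_one).mp hm.1
    exact ⟨hr.1, hr.2, of_decide_eq_true hm.2⟩

-- ===== VERDICT (by name: the statement is the Claim_ definition above) =====
theorem JmJm_spec : Claim_equal_JmJm := by
  intro mb _ _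
  unfold Spec_JmJm
  exact pvMain mb
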